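-- pv_equiv track=rewrite | github.com/arknave/project-euler | python/pe189.py | color_up
-- ===== SOURCE A (Python) =====
-- from collections import defaultdict
--
-- def color_up(downs):
--     if not downs:
--         return {(x,): 1 for x in range(3)}
--
--     res = defaultdict(int)
--     for state, freq in downs.items():
--         k = len(state)
--         cur = []
--         def inner(idx):
--             if len(cur) == k + 1:
--                 res[tuple(cur)] += freq
--                 return
--
--             for x in range(3):
--                 valid = (idx == 0 or x != state[idx - 1]) and (idx == k or x != state[idx])
--                 if valid:
--                     cur.append(x)
--                     inner(idx + 1)
--                     cur.pop()
--
--         inner(0)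
--
--     return res
-- ===== SOURCE B (Python) =====
-- from collections import defaultdict
--
-- def color_up(downs):
--     if not downs:
--         return {(x,): 1 for x in range(3)}
--
--     res = defaultdict(int)
--     for state, freq in downs.items():
--         k = len(state)
--         allowed = [[x for x in range(3)
--                     if (i == 0 or x != state[i - 1]) and (i == k or x != state[i])]
--                    for i in range(k + 1)]
--         rows = [()]
--         for choices in allowed:
--             rows = [row + (x,) for row in rows for x in choices]
--         for row in rows:
--             res[row] += freq
--     return res
-- ===== Notes on version B (the rewrite author's own statement) =====
-- stated objective: alternative
-- what changed: Replaces the recursive backtracking DFS with a mutable shared cur list by a per-position precomputation of allowed colors followed by an iterative Cartesian-product expansion of complete rows, avoiding per-node Python function-call and append/pop overhead.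
import Mathlib
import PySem

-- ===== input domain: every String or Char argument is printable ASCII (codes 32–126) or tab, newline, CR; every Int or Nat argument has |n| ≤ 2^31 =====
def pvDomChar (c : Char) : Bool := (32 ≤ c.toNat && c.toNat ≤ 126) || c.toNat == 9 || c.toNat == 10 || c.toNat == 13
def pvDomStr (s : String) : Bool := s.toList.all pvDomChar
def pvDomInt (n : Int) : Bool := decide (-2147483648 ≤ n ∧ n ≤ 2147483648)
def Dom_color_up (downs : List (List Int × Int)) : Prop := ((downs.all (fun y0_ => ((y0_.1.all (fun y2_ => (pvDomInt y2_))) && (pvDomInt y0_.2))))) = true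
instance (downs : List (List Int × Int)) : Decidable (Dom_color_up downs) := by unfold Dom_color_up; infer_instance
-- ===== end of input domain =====

-- B changes the algorithm (iterative Cartesian product of precomputed allowed-color
-- lists instead of a backtracking DFS); same results, similar cost.

-- ===== PORT A =====
-- The recursive `inner`; `fuel` only makes the recursion structural (the Python
-- recursion depth is exactly k+1, never more; the fuel-0 branch is unreachable).
-- `state.getD (idx-1) 0` / `state.getD idx 0` are only consulted when the
-- short-circuited Python would index in range, so the default is never the value used.
def pvInnerA (state : List Int) (freq : Int) (k : Nat) :
    Nat → Nat → List Int → PySem.Dict (List Int) Int → PySem.Dict (List Int) Int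
  | idx, fuel, cur, res =>
    if cur.length = k + 1 then res.modify cur 0 (· + freq)
    else
      match fuel with
      | 0 => res
      | fuel + 1 =>
        [(0 : Int), 1, 2].foldl (fun r x =>
          if (idx = 0 ∨ x ≠ state.getD (idx - 1) 0) ∧ (idx = k ∨ x ≠ state.getD idx 0)
          then pvInnerA state freq k (idx + 1) fuel (cur ++ [x]) r
          else r) res

def color_up (downs : List (List Int × Int)) : List (List Int × Int) :=
  if downs = [] then [([0], 1), ([1], 1), ([2], 1)]
  else
    (downs.foldl (fun res p =>
      pvInnerA p.1 p.2 p.1.length 0 (p.1.length + 1) [] res) PySem.Dict.empty).items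

-- ===== PORT B =====
def color_up_alt (downs : List (List Int × Int)) : List (List Int × Int) :=
  if downs = [] then [([0], 1), ([1], 1), ([2], 1)]
  else
    (downs.foldl (fun res p =>
      let state := p.1
      let freq := p.2
      let k := state.length
      let allowed := (List.range (k + 1)).map (fun i =>
        [(0 : Int), 1, 2].filter (fun x =>
          decide ((i = 0 ∨ x ≠ state.getD (i - 1) 0) ∧ (i = k ∨ x ≠ state.getD i 0))))
      let rows := allowed.foldl (fun rows choices =>
        rows.flatMap (fun row => choices.map (fun x => row ++ [x]))) [[]]
      rows.foldl (fun r row => r.modify row 0 (· + freq)) res) PySem.Dict.empty).items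

-- ===== PRECONDITION & SPEC =====
def Spec_color_up (downs : List (List Int × Int)) (out : List (List Int × Int)) : Prop := out = color_up_alt downs
instance (downs : List (List Int × Int)) (out : List (List Int × Int)) : Decidable (Spec_color_up downs out) := by unfold Spec_color_up; infer_instance

-- ===== CLAIM (what is proved, stated in full; the proofs are below) =====
def Claim_equal_color_up : Prop := ∀ (downs : List (List Int × Int)), Dom_color_up downs → Spec_color_up downs (color_up downs)

-- ===== LEMMAS AND PROOFS =====

-- the allowed colors at position i (B's filter)
def pvAllowedAt (state : List Int) (k : Nat) (i : Nat) : List Int :=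
  [(0 : Int), 1, 2].filter (fun x =>
    decide ((i = 0 ∨ x ≠ state.getD (i - 1) 0) ∧ (i = k ∨ x ≠ state.getD i 0)))

-- right-to-left Cartesian product (lexicographic order)
def pvProdR (l : List (List Int)) : List (List Int) :=
  l.foldr (fun ch acc => ch.flatMap (fun x => acc.map (x :: ·))) [[]]

theorem pv_foldl_flatMap {α β γ : Type} (g : γ → List α) (f : β → α → β) :
    ∀ (l : List γ) (b : β), (l.flatMap g).foldl f b = l.foldl (fun b x => (g x).foldl f b) b := by
  intro l
  induction l with
  | nil => intro b; rfl
  | cons c l ih => intro b; simp [List.flatMap_cons, List.foldl_append, ih]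

theorem pv_innerA_eq (state : List Int) (freq : Int) (k : Nat) :
    ∀ (fuel idx : Nat) (cur : List Int) (res : PySem.Dict (List Int) Int),
      cur.length = idx → idx + fuel = k + 1 →
      pvInnerA state freq k idx fuel cur res =
        (pvProdR ((List.range' idx fuel).map (pvAllowedAt state k))).foldl
          (fun r t => r.modify (cur ++ t) 0 (· + freq)) res := by
  intro fuel
  induction fuel with
  | zero =>
    intro idx cur res hlen hsum
    have : cur.length = k + 1 := by omega
    simp [pvInnerA, this, pvProdR]
  | succ f ih =>
    intro idx cur res hlen hsum
    have hne : ¬ cur.length = k + 1 := by omega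
    rw [pvInnerA]
    simp only [hne, if_false]
    have hrange : List.range' idx (f + 1) = idx :: List.range' (idx + 1) f := by
      simp [List.range'_succ]
    rw [hrange]
    simp only [List.map_cons]
    have hprod : pvProdR (pvAllowedAt state k idx :: (List.range' (idx + 1) f).map (pvAllowedAt state k))
        = (pvAllowedAt state k idx).flatMap
            (fun x => (pvProdR ((List.range' (idx + 1) f).map (pvAllowedAt state k))).map (x :: ·)) := by
      simp [pvProdR]
    rw [hprod, pv_foldl_flatMap]
    rw [show ([(0 : Int), 1, 2].foldl (fun r x =>
          if (idx = 0 ∨ x ≠ state.getD (idx - 1) 0) ∧ (idx = k ∨ x ≠ state.getD idx 0)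
          then pvInnerA state freq k (idx + 1) f (cur ++ [x]) r
          else r) res)
        = ((pvAllowedAt state k idx).foldl (fun r x =>
            pvInnerA state freq k (idx + 1) f (cur ++ [x]) r) res) by
      rw [pvAllowedAt, ← PySem.List.foldl_ite_eq_foldl_filter]]
    apply PySem.List.foldl_congr_mem
    intro r x _
    rw [ih (idx + 1) (cur ++ [x]) r (by simp [hlen]) (by omega)]
    rw [List.foldl_map]
    apply PySem.List.foldl_congr_mem
    intro r' t _
    simp

-- B's iterative product equals the right fold product
theorem pv_prodL_eq :
    ∀ (l : List (List Int)) (rows : List (List Int)),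
      l.foldl (fun rows choices => rows.flatMap (fun row => choices.map (fun x => row ++ [x]))) rows
        = rows.flatMap (fun r => (pvProdR l).map (r ++ ·)) := by
  intro l
  induction l with
  | nil =>
    intro rows
    simp [pvProdR]
  | cons ch l ih =>
    intro rows
    rw [List.foldl_cons, ih]
    simp only [pvProdR, List.foldr_cons]
    rw [List.flatMap_assoc]
    refine List.flatMap_congr (fun r _ => ?_)
    simp only [List.flatMap_map, List.map_flatMap, List.map_map]
    refine List.flatMap_congr (fun x _ => ?_)
    refine List.map_congr_left (fun t _ => ?_)
    simp [Function.comp, List.append_assoc]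

theorem pv_entry_eq (res : PySem.Dict (List Int) Int) (p : List Int × Int) :
    pvInnerA p.1 p.2 p.1.length 0 (p.1.length + 1) [] res =
      (((List.range (p.1.length + 1)).map (fun i =>
          [(0 : Int), 1, 2].filter (fun x =>
            decide ((i = 0 ∨ x ≠ p.1.getD (i - 1) 0) ∧ (i = p.1.length ∨ x ≠ p.1.getD i 0))))).foldl
        (fun rows choices => rows.flatMap (fun row => choices.map (fun x => row ++ [x]))) [[]]).foldl
        (fun r row => r.modify row 0 (· + p.2)) res := by
  rw [pv_innerA_eq p.1 p.2 p.1.length (p.1.length + 1) 0 [] res rfl (by omega)]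
  rw [pv_prodL_eq]
  have : (List.range (p.1.length + 1)).map (fun i =>
      [(0 : Int), 1, 2].filter (fun x =>
        decide ((i = 0 ∨ x ≠ p.1.getD (i - 1) 0) ∧ (i = p.1.length ∨ x ≠ p.1.getD i 0))))
      = (List.range' 0 (p.1.length + 1)).map (pvAllowedAt p.1 p.1.length) := by
    rw [List.range_eq_range']; rfl
  rw [this]
  simp [List.flatMap_cons]

-- ===== VERDICT (by name: the statement is the Claim_ definition above) =====
theorem color_up_spec : Claim_equal_color_up := by
  intro downs _
  unfold Spec_color_up color_up color_up_alt
  by_cases h : downs = []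
  · simp [h]
  · simp only [h, if_false]
    congr 1
    apply PySem.List.foldl_congr_mem
    intro res p _
    exact pv_entry_eq res p
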